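-- pv_equiv track=rewrite | github.com/JungYeonHwi/Algorithm_Study | python/programmers_python/ball toss.py | solution
-- ===== SOURCE A (Python) =====
-- def solution(numbers, k):
--     answer = 0
--
--     value = numbers
--
--     for i in range(0, len(numbers) * k) :
--         value.append(numbers[i])
--
--     cnt = 2 * k - 2
--
--     answer = value[cnt]
--
--     return answer
-- ===== SOURCE B (Python) =====
-- def solution(numbers, k):
--     # The appended copy is periodic with period len(numbers), so index directly.
--     return numbers[(2 * k - 2) % len(numbers)]
-- ===== Notes on version B (the rewrite author's own statement) =====
-- stated objective: faster
-- what changed: A materialises len(numbers)*k extra elements by appending to the (aliased) input list and then indexes it; B uses the list's periodicity and returns numbers[(2*k-2) % len(numbers)] directly, without building anything (and without mutating the input).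
import Mathlib
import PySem

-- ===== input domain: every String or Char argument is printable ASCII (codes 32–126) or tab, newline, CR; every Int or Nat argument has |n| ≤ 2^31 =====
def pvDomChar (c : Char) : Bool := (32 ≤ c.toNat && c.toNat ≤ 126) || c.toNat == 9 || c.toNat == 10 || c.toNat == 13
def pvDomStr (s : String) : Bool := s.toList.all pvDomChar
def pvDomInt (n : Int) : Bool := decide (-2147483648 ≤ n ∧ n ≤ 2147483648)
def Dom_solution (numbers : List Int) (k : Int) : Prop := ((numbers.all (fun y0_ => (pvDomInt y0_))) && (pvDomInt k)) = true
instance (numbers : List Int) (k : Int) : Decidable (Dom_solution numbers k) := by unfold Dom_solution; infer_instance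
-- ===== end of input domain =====

-- B replaces A's O(n*k) append loop by the O(1) closed form numbers[(2*k-2) % len(numbers)];
-- equivalence is about the RETURN value only: A appends len(numbers)*k elements to the caller's list in place, B does not mutate it.

-- ===== PORT A =====
-- value = numbers is an ALIAS, so each numbers[i] reads the growing list itself; the port folds over the same
-- range with the same growing list, modelled as an Array so that .append is O(1) push as in Python.
-- The loop index i is always ≥ 0 (range starts at 0) and < the current length, and the final value[cnt] is
-- Python indexing written out by hand (negative cnt counts from the end; out of range = IndexError, excluded by Pre_).
def solution (numbers : List Int) (k : Int) : Int :=
  let value := numbers.toArray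
  let value := (PySem.List.pyRange 0 ((numbers.length : Int) * k) 1).foldl
    (fun v i => v.push (v[i.toNat]!)) value
  let cnt := 2 * k - 2
  if cnt < 0 then value[(cnt + value.size).toNat]! else value[cnt.toNat]!

-- ===== PORT B =====
def solution_alt (numbers : List Int) (k : Int) : Int :=
  PySem.List.pyGetD numbers (PySem.Int.mod (2 * k - 2) (numbers.length : Int)) 0

-- ===== PRECONDITION & SPEC =====
-- Pre_ = exactly the inputs where A's final index is in range of the extended list (A raises IndexError otherwise).
def Pre_solution (numbers : List Int) (k : Int) : Prop :=
  numbers ≠ [] ∧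
  ((1 ≤ k ∧ 2 * k - 2 < (numbers.length : Int) * (k + 1)) ∨
   (k ≤ 0 ∧ -(numbers.length : Int) ≤ 2 * k - 2))
instance (numbers : List Int) (k : Int) : Decidable (Pre_solution numbers k) := by
  unfold Pre_solution; infer_instance

def pvWitness_solution : List Int × Int := ([1, 2, 3], 2)


def Spec_solution (numbers : List Int) (k : Int) (out : Int) : Prop := out = solution_alt numbers k
instance (numbers : List Int) (k : Int) (out : Int) : Decidable (Spec_solution numbers k out) := by unfold Spec_solution; infer_instance

-- ===== CLAIM (what is proved, stated in full; the proofs are below) =====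
def Claim_equal_solution : Prop := ∀ (numbers : List Int) (k : Int), Dom_solution numbers k → Pre_solution numbers k → Spec_solution numbers k (solution numbers k)

-- ===== LEMMAS AND PROOFS =====

-- The loop invariant: after m appends the array has size n + m and is periodic with period n = numbers.length.
theorem pv_loop_inv (numbers : List Int) (hn : numbers ≠ []) (m : Nat) :
    (((PySem.List.pyRange 0 (m : Int) 1).foldl
        (fun v i => v.push (v[i.toNat]!)) numbers.toArray).size
      = numbers.length + m) ∧
    (∀ j : Nat, j < numbers.length + m →
      ((PySem.List.pyRange 0 (m : Int) 1).foldl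
        (fun v i => v.push (v[i.toNat]!)) numbers.toArray)[j]?
      = numbers[j % numbers.length]?) := by
  have hn0 : 0 < numbers.length := List.length_pos_iff.mpr hn
  induction m with
  | zero =>
    rw [PySem.List.pyRange_one_eq_nil (by norm_num)]
    refine ⟨by simp, ?_⟩
    intro j hj
    simp only [List.foldl_nil, List.getElem?_toArray]
    rw [Nat.mod_eq_of_lt (by omega)]
  | succ m ih =>
    have hsplit : PySem.List.pyRange 0 ((m + 1 : Nat) : Int) 1
        = PySem.List.pyRange 0 (m : Int) 1 ++ [(m : Int)] := by
      push_cast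
      exact PySem.List.pyRange_one_succ_right (by positivity)
    rw [hsplit, List.foldl_append]
    obtain ⟨hlen, hget⟩ := ih
    set w := (PySem.List.pyRange 0 (m : Int) 1).foldl
        (fun v i => v.push (v[i.toNat]!)) numbers.toArray with hw
    simp only [List.foldl_cons, List.foldl_nil, Int.toNat_natCast]
    have hmlt : m < w.size := by omega
    have hmn : m % numbers.length < numbers.length := Nat.mod_lt _ hn0
    have helem : w[m]! = numbers[m % numbers.length] := by
      rw [getElem!_pos w m hmlt]
      have h1 : w[m]? = numbers[m % numbers.length]? := hget m (by omega)
      rw [Array.getElem?_eq_getElem hmlt, List.getElem?_eq_getElem hmn] at h1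
      exact Option.some.inj h1
    constructor
    · simp [Array.size_push, hlen]; omega
    · intro j hj
      by_cases hcase : j < numbers.length + m
      · rw [Array.getElem?_push_lt (show j < w.size by omega),
          ← Array.getElem?_eq_getElem (show j < w.size by omega)]
        exact hget j hcase
      · have hjw : j = w.size := by omega
        rw [hjw, Array.getElem?_push_size, helem, hlen, Nat.add_mod_left,
          List.getElem?_eq_getElem hmn]

-- ===== VERDICT (by name: the statement is the Claim_ definition above) =====
theorem solution_spec : Claim_equal_solution := by
  intro numbers k _hdom hpre
  obtain ⟨hn, hcase⟩ := hpre
  have hn0 : 0 < numbers.length := List.length_pos_iff.mpr hn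
  unfold Spec_solution solution solution_alt
  simp only []
  rcases hcase with ⟨hk1, hub⟩ | ⟨hk0, hlb⟩
  · -- k ≥ 1 : the loop appends numbers.length * k elements; index 2k-2 ≥ 0.
    have hm : ((numbers.length : Int) * k) = ((numbers.length * k.toNat : Nat) : Int) := by
      push_cast; rw [Int.toNat_of_nonneg (by omega)]
    rw [hm]
    obtain ⟨hlen, hget⟩ := pv_loop_inv numbers hn (numbers.length * k.toNat)
    set w := (PySem.List.pyRange 0 ((numbers.length * k.toNat : Nat) : Int) 1).foldl
        (fun v i => v.push (v[i.toNat]!)) numbers.toArray with hw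
    rw [if_neg (by omega)]
    have hcnt : (2 * k - 2) = ((2 * k - 2).toNat : Int) := by omega
    have hcntlt : (2 * k - 2).toNat < numbers.length + numbers.length * k.toNat := by
      have : (2 * k - 2) < ((numbers.length + numbers.length * k.toNat : Nat) : Int) := by
        push_cast; rw [Int.toNat_of_nonneg (by omega)]; nlinarith
      omega
    have hjlt : (2 * k - 2).toNat % numbers.length < numbers.length := Nat.mod_lt _ hn0
    rw [hcnt, PySem.Int.mod_natCast, PySem.List.pyGetD_natCast, Int.toNat_natCast]
    have h1 : w[(2 * k - 2).toNat]? = numbers[(2 * k - 2).toNat % numbers.length]? :=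
      hget _ hcntlt
    rw [getElem!_pos w _ (by omega)]
    rw [Array.getElem?_eq_getElem (by omega), List.getElem?_eq_getElem hjlt] at h1
    rw [Option.some.inj h1]
    simp [List.getD, List.getElem?_eq_getElem hjlt]
  · -- k ≤ 0 : the range is empty, the loop does nothing; index 2k-2 < 0 wraps from the end.
    have hempty : PySem.List.pyRange 0 ((numbers.length : Int) * k) 1 = [] :=
      PySem.List.pyRange_one_eq_nil (by nlinarith)
    rw [hempty]
    simp only [List.foldl_nil]
    set c := (-(2 * k - 2)).toNat with hc
    have hc1 : 0 < c := by omega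
    have hc2 : c ≤ numbers.length := by omega
    have hcnt : (2 * k - 2) = -(c : Int) := by omega
    have hmod : PySem.Int.mod (-(c : Int)) (numbers.length : Int)
        = ((numbers.length - c : Nat) : Int) := by
      rw [PySem.Int.mod_eq_emod_of_pos (show (0:Int) < (numbers.length : Int) by exact_mod_cast hn0)]
      have h := Int.add_mul_emod_self_left (a := -(c : Int)) (b := (numbers.length : Int)) (c := 1)
      rw [mul_one] at h
      rw [← h, Int.emod_eq_of_lt (by omega) (by omega)]
      push_cast [hc2]
      omega
    have hlt : numbers.length - c < numbers.length := by omega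
    rw [hcnt, hmod, if_pos (by omega), PySem.List.pyGetD_natCast]
    have hidx : ((-(c : Int)) + (numbers.toArray.size : Int)).toNat = numbers.length - c := by
      simp only [List.size_toArray]; omega
    rw [hidx, getElem!_pos _ _ (by simpa using hlt)]
    simp [List.getD, List.getElem?_eq_getElem hlt]
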